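-- pv_equiv track=rewrite | github.com/oh2279/oh2279 | 프로그래머스/lv1/1845. 폰켓몬/폰켓몬.py | solution
-- ===== SOURCE A (Python) =====
-- def solution(nums):
--     answer = 0
--     dict = {}
--     can_get = len(nums)//2
--
--     for num in nums:
--         if num in dict:
--             dict[num] = dict[num]+1
--         else:
--             dict[num]=1
--
--     answer = len(dict)
--     if len(dict) > can_get:
--         answer = can_get
--     return answer
-- ===== SOURCE B (Python) =====
-- def solution(nums):
--     s = sorted(nums)
--     distinct = 0
--     prev = None
--     for x in s:
--         if prev is None or x != prev:
--             distinct += 1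
--         prev = x
--     return min(distinct, len(nums) // 2)
-- ===== Notes on version B (the rewrite author's own statement) =====
-- stated objective: alternative
-- what changed: B counts distinct values by sorting and comparing each element with its predecessor in one pass, instead of building a hash dict of counts, and takes min with len//2 instead of a branch.
import Mathlib
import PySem

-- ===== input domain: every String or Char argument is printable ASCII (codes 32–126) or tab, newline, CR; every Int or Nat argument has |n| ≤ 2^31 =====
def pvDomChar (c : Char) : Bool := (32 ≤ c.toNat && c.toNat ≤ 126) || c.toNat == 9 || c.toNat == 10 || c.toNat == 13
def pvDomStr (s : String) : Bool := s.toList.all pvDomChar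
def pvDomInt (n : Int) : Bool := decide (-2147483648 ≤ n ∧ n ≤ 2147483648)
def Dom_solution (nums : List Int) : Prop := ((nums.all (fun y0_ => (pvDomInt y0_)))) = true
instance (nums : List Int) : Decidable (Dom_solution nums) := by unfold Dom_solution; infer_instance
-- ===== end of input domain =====

-- B counts distinct values by a sort and one adjacent-comparison pass instead of A's count dict; same cost class, different algorithm.

-- ===== PORT A =====
-- for num in nums: if num in dict: dict[num] += 1 else: dict[num] = 1
def solution (nums : List Int) : Int :=
  let dict : PySem.Dict Int Int :=
    nums.foldl (fun d num =>
      if d.contains num then d.insert num ((d.get? num).getD 0 + 1)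
      else d.insert num 1) PySem.Dict.empty
  let can_get : Int := PySem.Int.floordiv (nums.length : Int) 2
  let answer : Int := (dict.size : Int)
  if (dict.size : Int) > can_get then can_get else answer

-- ===== PORT B =====
-- s = sorted(nums); one pass comparing each element with its predecessor
def solution_alt (nums : List Int) : Int :=
  let s := PySem.List.sorted nums (fun x => x) false
  let st : Int × Option Int :=
    s.foldl (fun (st : Int × Option Int) x =>
      (if st.2 = none ∨ st.2 ≠ some x then st.1 + 1 else st.1, some x)) (0, none)
  min st.1 (PySem.Int.floordiv (nums.length : Int) 2)

-- ===== PRECONDITION & SPEC =====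
def Spec_solution (nums : List Int) (out : Int) : Prop := out = solution_alt nums
instance (nums : List Int) (out : Int) : Decidable (Spec_solution nums out) := by unfold Spec_solution; infer_instance

-- ===== CLAIM (what is proved, stated in full; the proofs are below) =====
def Claim_equal_solution : Prop := ∀ (nums : List Int), Dom_solution nums → Spec_solution nums (solution nums)

-- ===== LEMMAS AND PROOFS =====

-- A's loop body is the standard counter step
lemma stepA_eq (d : PySem.Dict Int Int) (num : Int) :
    (if d.contains num then d.insert num ((d.get? num).getD 0 + 1)
     else d.insert num 1) = d.insert num (d.getD num 0 + 1) := by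
  by_cases h : d.contains num = true
  · simp [h, PySem.Dict.getD]
  · have h' : d.get? num = none := by
      rw [PySem.Dict.get?_eq_none_iff_contains]
      simpa using h
    simp [h, h', PySem.Dict.getD]

lemma dictA_eq_counter (nums : List Int) :
    (nums.foldl (fun d num =>
      if d.contains num then d.insert num ((d.get? num).getD 0 + 1)
      else d.insert num 1) (PySem.Dict.empty : PySem.Dict Int Int)) = PySem.Dict.counter nums := by
  rw [← PySem.Dict.foldl_insert_getD_add_one_eq_counter]
  congr 1
  funext d num
  exact stepA_eq d num

-- length of the ordered dedup = cardinality of the underlying finset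
lemma ofList_length_eq_card (xs : List Int) :
    (PySem.Set.ofList xs).length = xs.toFinset.card := by
  have hnd : (PySem.Set.ofList xs).Nodup := PySem.Set.nodup_ofList xs
  have hfs : (PySem.Set.ofList xs).toFinset = xs.toFinset := by
    apply Finset.ext
    intro a
    simp [List.mem_toFinset, PySem.Set.mem_ofList]
  calc (PySem.Set.ofList xs).length
      = (PySem.Set.ofList xs).toFinset.card := (List.toFinset_card_of_nodup hnd).symm
    _ = xs.toFinset.card := by rw [hfs]

lemma perm_toFinset {xs ys : List Int} (h : xs.Perm ys) : xs.toFinset = ys.toFinset :=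
  Finset.ext fun a => by simp [List.mem_toFinset, h.mem_iff]

-- B's adjacent-comparison pass on a ≤-sorted tail counts the distinct values
lemma pass_sorted (t : List Int) : ∀ (p acc : Int), (p :: t).Pairwise (· ≤ ·) →
    (t.foldl (fun (st : Int × Option Int) x =>
      (if st.2 = none ∨ st.2 ≠ some x then st.1 + 1 else st.1, some x)) (acc, some p)).1
      = acc + ((p :: t).toFinset.card : Int) - 1 := by
  induction t with
  | nil => intro p acc _; simp
  | cons x t' ih =>
    intro p acc hp
    have hpx : p ≤ x := (List.pairwise_cons.1 hp).1 x (by simp)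
    have hrest : (x :: t').Pairwise (· ≤ ·) := (List.pairwise_cons.1 hp).2
    simp only [List.foldl_cons]
    by_cases hxp : x = p
    · have hcond : ¬ ((some p : Option Int) = none ∨ (some p : Option Int) ≠ some x) := by
        simp [hxp]
      rw [if_neg hcond, ih x acc hrest]
      have hcard : ((p :: x :: t').toFinset.card) = ((x :: t').toFinset.card) := by
        subst hxp; simp [List.toFinset_cons]
      rw [hcard]
    · have hpnot : p ∉ (x :: t') := by
        intro hmem
        rcases List.mem_cons.1 hmem with h | h
        · exact hxp h.symm
        · have hxle : x ≤ p := (List.pairwise_cons.1 hrest).1 p h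
          exact hxp (le_antisymm hxle hpx)
      have hcard : ((p :: x :: t').toFinset.card) = ((x :: t').toFinset.card) + 1 := by
        simp only [List.toFinset_cons (a := p)]
        rw [Finset.card_insert_of_notMem (by simpa using hpnot)]
      have hcond : ((some p : Option Int) = none ∨ (some p : Option Int) ≠ some x) := by
        right; simpa using fun h => hxp h.symm
      rw [if_pos hcond, ih x (acc + 1) hrest, hcard]
      push_cast
      ring

lemma passB_eq (nums : List Int) :
    ((PySem.List.sorted nums (fun x => x) false).foldl (fun (st : Int × Option Int) x =>
      (if st.2 = none ∨ st.2 ≠ some x then st.1 + 1 else st.1, some x)) (0, none)).1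
      = (nums.toFinset.card : Int) := by
  have hperm : (PySem.List.sorted nums (fun x => x) false).Perm nums :=
    PySem.List.sorted_perm nums (fun x => x) false
  have hfs : (PySem.List.sorted nums (fun x => x) false).toFinset = nums.toFinset :=
    perm_toFinset hperm
  have hpw : (PySem.List.sorted nums (fun x => x) false).Pairwise (· ≤ ·) := by
    simpa using PySem.List.sorted_pairwise nums (fun x => x)
  cases hs : PySem.List.sorted nums (fun x => x) false with
  | nil =>
    have : nums = [] := by
      have := hperm; rw [hs] at this
      exact this.symm.eq_nil
    simp [this]
  | cons h t =>
    rw [hs] at hpw hfs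
    simp only [List.foldl_cons]
    rw [if_pos (Or.inl trivial : (True ∨ (none : Option Int) ≠ some h))]
    rw [pass_sorted t h (0 + 1) hpw, ← hfs]
    have hcard : 1 ≤ (h :: t).toFinset.card := by
      have : h ∈ (h :: t).toFinset := by simp
      exact Finset.card_pos.2 ⟨h, this⟩
    push_cast
    omega

lemma sizeA_eq (nums : List Int) :
    ((nums.foldl (fun d num =>
      if d.contains num then d.insert num ((d.get? num).getD 0 + 1)
      else d.insert num 1) (PySem.Dict.empty : PySem.Dict Int Int)).size : Int)
      = (nums.toFinset.card : Int) := by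
  rw [dictA_eq_counter nums]
  have hk : (PySem.Dict.counter nums).keys = PySem.Set.ofList nums :=
    PySem.Dict.keys_counter nums
  have hsz : (PySem.Dict.counter nums).size = (PySem.Set.ofList nums).length := by
    have := congrArg List.length hk
    simpa [PySem.Dict.keys, PySem.Dict.size] using this
  rw [hsz, ofList_length_eq_card]

-- ===== VERDICT (by name: the statement is the Claim_ definition above) =====
theorem solution_spec : Claim_equal_solution := by
  intro nums _
  show solution nums = solution_alt nums
  simp only [solution, solution_alt]
  rw [sizeA_eq nums, passB_eq nums]
  set c := PySem.Int.floordiv (nums.length : Int) 2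
  set d := (nums.toFinset.card : Int)
  by_cases h : d > c
  · simp [h, min_eq_right (le_of_lt h)]
  · simp [h, min_eq_left (le_of_not_gt h)]
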